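-- pv_equiv track=rewrite | github.com/cflb/SistemasWEB-I-ifbaiano | aula2 - manipulando strings/manipulando_string_com_funcao.py | invertePalavra
-- ===== SOURCE A (Python) =====
-- def invertePalavra(palavra):
--     """
--         Esta função recebe uma frase, inverte toda sua estrutura e mostra apenas a ultima palavra.
--     """
--     comprimento = len(palavra)
--     palavra_invertida = palavra[::-1]
--     nova_palavra = ""
--
--     for letra in palavra_invertida:
--         if letra == " ": #quando a letra for igual ao espaço PARE
--             break #BREAK para qualquer operação
--         else:
--             nova_palavra = nova_palavra + letra
--
--     return nova_palavra
-- ===== SOURCE B (Python) =====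
-- def invertePalavra(palavra):
--     # Find the boundary of the last space-delimited word, then reverse only that tail.
--     i = palavra.rfind(" ")
--     return palavra[i+1:][::-1]
-- ===== Notes on version B (the rewrite author's own statement) =====
-- stated objective: faster
-- what changed: B drops A's reverse-whole-string-then-scan loop with char-by-char string accumulation: it locates the last literal space with rfind(" ") and returns the reversed tail slice palavra[i+1:][::-1].
import Mathlib
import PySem

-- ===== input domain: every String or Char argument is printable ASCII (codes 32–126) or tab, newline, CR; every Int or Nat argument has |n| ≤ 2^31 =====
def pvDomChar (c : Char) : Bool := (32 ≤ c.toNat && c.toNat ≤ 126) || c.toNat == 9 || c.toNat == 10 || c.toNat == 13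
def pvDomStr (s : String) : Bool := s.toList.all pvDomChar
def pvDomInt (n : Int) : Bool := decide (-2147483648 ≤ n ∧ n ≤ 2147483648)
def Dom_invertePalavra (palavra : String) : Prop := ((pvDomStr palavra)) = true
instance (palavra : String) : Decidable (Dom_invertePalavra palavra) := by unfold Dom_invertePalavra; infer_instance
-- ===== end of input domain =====

-- B replaces A's reverse-whole-string-then-scan loop by locating the last literal space
-- with rfind and reversing only the tail slice, avoiding A's char-by-char accumulation
-- (objective: faster; measured).

-- ===== PORT A =====
-- the for-loop over palavra_invertida: break on ' ', else nova_palavra = nova_palavra + letra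
def invertePalavraLoop (acc : List Char) : List Char → List Char
  | [] => acc
  | c :: rest => if c = ' ' then acc else invertePalavraLoop (acc ++ [c]) rest

def invertePalavra (palavra : String) : String :=
  let _comprimento := PySem.Str.len palavra          -- computed by A, never used
  let palavra_invertida := palavra.toList.reverse    -- palavra[::-1] (PySem.List.slice?_none_none_neg_one)
  String.ofList (invertePalavraLoop [] palavra_invertida)

-- ===== PORT B =====
def invertePalavra_alt (palavra : String) : String :=
  let i := PySem.Str.rfind palavra " "
  -- palavra[i+1:][::-1]
  String.ofList ((PySem.List.slice palavra.toList (some (i + 1)) none).reverse)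

-- ===== PRECONDITION & SPEC =====
def Spec_invertePalavra (palavra : String) (out : String) : Prop := out = invertePalavra_alt palavra
instance (palavra : String) (out : String) : Decidable (Spec_invertePalavra palavra out) := by unfold Spec_invertePalavra; infer_instance

-- ===== CLAIM (what is proved, stated in full; the proofs are below) =====
def Claim_equal_invertePalavra : Prop := ∀ (palavra : String), Dom_invertePalavra palavra → Spec_invertePalavra palavra (invertePalavra palavra)

-- ===== LEMMAS AND PROOFS =====

-- A's loop is takeWhile "not a space" of the list it iterates over
theorem invertePalavraLoop_eq (acc l : List Char) :
    invertePalavraLoop acc l = acc ++ l.takeWhile (fun c => decide (c ≠ ' ')) := by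
  induction l generalizing acc with
  | nil => simp [invertePalavraLoop]
  | cons c rest ih =>
    by_cases hc : c = ' ' <;> simp [invertePalavraLoop, hc, ih]

-- rfind.go ignores a last appended element while scanning strictly below xs.length
theorem rfind_go_append_lt (k : Nat) : ∀ (xs : List Char) (c : Char), k < xs.length →
    PySem.Chars.rfind.go (xs ++ [c]) [' '] k = PySem.Chars.rfind.go xs [' '] k := by
  induction k with
  | zero =>
    intro xs c h
    match xs with
    | x :: t => simp [PySem.Chars.rfind.go, List.isPrefixOf]
  | succ k ih =>
    intro xs c h
    have hdrop : (xs ++ [c]).drop (k + 1) = xs.drop (k + 1) ++ [c] :=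
      List.drop_append_of_le_length (le_of_lt h)
    obtain ⟨x, t, hxt⟩ : ∃ x t, xs.drop (k + 1) = x :: t := by
      cases hx : xs.drop (k + 1) with
      | nil => exfalso; have := List.length_drop (l := xs) (i := k + 1); rw [hx] at this; simp at this; omega
      | cons x t => exact ⟨x, t, rfl⟩
    simp [PySem.Chars.rfind.go, hdrop, hxt, List.isPrefixOf, ih xs c (by omega)]

-- rfind over a list with one more element at the end
theorem rfind_append (xs : List Char) (c : Char) :
    PySem.Chars.rfind (xs ++ [c]) [' '] =
      if c = ' ' then (xs.length : Int) else PySem.Chars.rfind xs [' '] := by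
  cases xs with
  | nil =>
    by_cases hc : c = ' '
    · simp [PySem.Chars.rfind, PySem.Chars.rfind.go, List.isPrefixOf, hc]
    · simp [PySem.Chars.rfind, PySem.Chars.rfind.go, List.isPrefixOf, hc, Ne.symm hc]
  | cons x t =>
    have hlen : ((x :: t) ++ [c]).length = t.length + 2 := by simp
    unfold PySem.Chars.rfind
    rw [hlen]
    by_cases hc : c = ' '
    · simp [PySem.Chars.rfind.go, List.isPrefixOf, hc]
    · have hgo := rfind_go_append_lt t.length (x :: t) c (by simp)
      simp only [List.cons_append] at hgo
      simp [PySem.Chars.rfind.go, List.isPrefixOf, hc, Ne.symm hc]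
      exact hgo

-- bounds for rfind with a one-character needle
theorem rfind_bounds (xs : List Char) :
    -1 ≤ PySem.Chars.rfind xs [' '] ∧ PySem.Chars.rfind xs [' '] < xs.length := by
  induction xs using List.reverseRecOn with
  | nil => simp [PySem.Chars.rfind, PySem.Chars.rfind.go, List.isPrefixOf]
  | append_singleton xs c ih =>
    rw [rfind_append]
    by_cases hc : c = ' '
    · simp [hc]
    · simp [hc]
      omega

-- the heart of the equivalence: scanning the reversal up to the first space
-- is the reversed tail after the last space
theorem takeWhile_reverse_eq (cs : List Char) :
    cs.reverse.takeWhile (fun c => decide (c ≠ ' ')) =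
      (cs.drop ((PySem.Chars.rfind cs [' '] + 1).toNat)).reverse := by
  induction cs using List.reverseRecOn with
  | nil => simp [PySem.Chars.rfind, PySem.Chars.rfind.go, List.isPrefixOf]
  | append_singleton xs c ih =>
    by_cases hc : c = ' '
    · rw [rfind_append, if_pos hc]
      have ht : ((xs.length : Int) + 1).toNat = xs.length + 1 := by omega
      simp [hc, ht]
    · rw [rfind_append, if_neg hc]
      obtain ⟨hlo, hhi⟩ := rfind_bounds xs
      have hk : (PySem.Chars.rfind xs [' '] + 1).toNat ≤ xs.length := by omega
      rw [List.drop_append_of_le_length hk]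
      have hrev : (xs ++ [c]).reverse = c :: xs.reverse := by simp
      rw [hrev, List.takeWhile_cons, if_pos (by simp [hc]), ih]
      simp

-- ===== VERDICT (by name: the statement is the Claim_ definition above) =====
theorem invertePalavra_spec : Claim_equal_invertePalavra := by
  intro palavra _
  show invertePalavra palavra = invertePalavra_alt palavra
  obtain ⟨hlo, _⟩ := rfind_bounds palavra.toList
  rw [show invertePalavra palavra
        = String.ofList (invertePalavraLoop [] palavra.toList.reverse) from rfl,
      show invertePalavra_alt palavra
        = String.ofList ((PySem.List.slice palavra.toList
            (some (PySem.Str.rfind palavra " " + 1)) none).reverse) from rfl]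
  have hr : PySem.Str.rfind palavra " " = PySem.Chars.rfind palavra.toList [' '] := by
    simp [PySem.Str.rfind_eq]
  rw [hr, PySem.List.slice_from palavra.toList (by omega), invertePalavraLoop_eq]
  rw [takeWhile_reverse_eq]
  simp
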